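-- pv_equiv track=rewrite | github.com/mogalter/AdventOfCode2020 | Day-16/Python_Day16_Solution.py | find_exact_order
-- ===== SOURCE A (Python) =====
-- from queue import PriorityQueue
--
-- def find_exact_order(potential_orders):
-- 	ticket_pq = PriorityQueue()
-- 	order = {}
-- 	seen = set()
-- 	for category in potential_orders:
-- 		ticket_pq.put((len(potential_orders[category]), category))
-- 	# using a min queue, we will start by first matching the smallest potential categories
-- 	while not ticket_pq.empty():
-- 		cur_category_details = ticket_pq.get()
-- 		cols_len, category = cur_category_details
-- 		for col in potential_orders[category]:
-- 			if col not in seen: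
-- 				seen.add(col)
-- 				order[category] = col
-- 				break
-- 	return order
-- ===== SOURCE B (Python) =====
-- def find_exact_order(potential_orders):
-- 	# Elimination algorithm: sort the (category, candidates) items once; each
-- 	# category claims the HEAD of its remaining candidate list, and the claimed
-- 	# column is deleted from every later list that still holds it (an inverted
-- 	# index says which lists can) — no seen set, no scan for an unclaimed column.
-- 	items = sorted(potential_orders.items(), key=lambda kv: (len(kv[1]), kv[0]))
-- 	rests = [kv[1] for kv in items]
-- 	holders = {}
-- 	for j, v in enumerate(rests):
-- 		for x in v:
-- 			holders.setdefault(x, []).append(j)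
-- 	order = {}
-- 	for i, (cat, _) in enumerate(items):
-- 		cands = rests[i]
-- 		if cands:
-- 			col = cands[0]
-- 			order[cat] = col
-- 			for j in holders.get(col, ()):
-- 				if j > i and col in rests[j]:
-- 					rests[j] = [x for x in rests[j] if x != col]
-- 	return order
-- ===== Notes on version B (the rewrite author's own statement) =====
-- stated objective: alternative
-- what changed: Replaces A's priority-queue + seen-set greedy (pop categories from a heap, scan each candidate list for the first column not in a seen set) with an elimination algorithm: sort the items once, then each category claims the head of its remaining list and the claimed column is deleted from every later list that still holds it (located via an inverted column-to-lists index), so no heap and no seen set exist.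
import Mathlib
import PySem

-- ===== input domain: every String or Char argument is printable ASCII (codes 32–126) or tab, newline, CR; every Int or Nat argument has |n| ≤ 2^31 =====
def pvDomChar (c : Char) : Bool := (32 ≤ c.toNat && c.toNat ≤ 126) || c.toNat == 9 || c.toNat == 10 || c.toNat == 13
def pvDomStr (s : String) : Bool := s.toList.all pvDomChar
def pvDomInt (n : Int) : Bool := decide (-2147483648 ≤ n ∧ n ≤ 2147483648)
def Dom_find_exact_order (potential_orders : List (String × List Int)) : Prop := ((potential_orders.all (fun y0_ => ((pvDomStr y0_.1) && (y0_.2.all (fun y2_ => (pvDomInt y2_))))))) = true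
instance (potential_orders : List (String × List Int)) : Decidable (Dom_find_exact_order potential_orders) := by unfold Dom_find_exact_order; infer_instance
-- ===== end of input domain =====

-- B replaces A's priority-queue + seen-set greedy with an elimination algorithm:
-- each category takes the head of its remaining list, and the claimed column is
-- deleted from all later lists (no seen set, no inner scan). Same return value.

-- ===== PORT A =====
-- Python tuple comparison on (int, str) is lexicographic; ported exactly as `toLex` on Int × String.
-- PriorityQueue: put appends to the pool; get removes the minimum element (min? then erase).
-- inner `for col in potential_orders[category]: if col not in seen: … break`
def pqInnerA (cols : List Int) (category : String)
    (order : PySem.Dict String Int) (seen : PySem.Set Int) :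
    PySem.Dict String Int × PySem.Set Int :=
  match cols with
  | [] => (order, seen)
  | col :: rest =>
    if PySem.Set.contains seen col then pqInnerA rest category order seen
    else (PySem.Dict.insert order category col, PySem.Set.add seen col)

-- the `while not ticket_pq.empty():` loop; `get` pops the smallest (len, category) tuple
def pqDrainA (po : List (String × List Int)) (pq : List (Int × String))
    (order : PySem.Dict String Int) (seen : PySem.Set Int) : PySem.Dict String Int :=
  match h : PySem.List.min? pq (fun p => toLex p) with
  | none => order
  | some m =>
    let st := pqInnerA (PySem.Dict.getD ⟨po⟩ m.2 []) m.2 order seen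
    pqDrainA po (pq.erase m) st.1 st.2
termination_by pq.length
decreasing_by
  have hm := PySem.List.min?_mem h
  have h1 := List.length_erase_of_mem hm
  have h2 := List.length_pos_of_mem hm
  omega

def find_exact_order (potential_orders : List (String × List Int)) : List (String × Int) :=
  (pqDrainA potential_orders
    (potential_orders.map
      (fun kv => (((PySem.Dict.getD ⟨potential_orders⟩ kv.1 []).length : Int), kv.1)))
    ⟨[]⟩ PySem.Set.empty).items

-- ===== PORT B =====
-- the `for i, (cat, _) in enumerate(items)` loop over `items`/`rests` in parallel,
-- ported as structural recursion carrying the still-unprocessed (category, rest) suffix;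
-- `if j > i and col in rests[j]: rests[j] = [x for x in rests[j] if x != col]` is the
-- guarded filter mapped over every later entry (the `holders` inverted index only skips
-- later j whose list never contained col, where the guard is false and the entry unchanged)
def bElim (items : List (String × List Int)) (order : PySem.Dict String Int) :
    PySem.Dict String Int :=
  match items with
  | [] => order
  | (cat, cands) :: rest =>
    match cands with
    | [] => bElim rest order
    | col :: _ =>
      bElim (rest.map (fun kv =>
          if col ∈ kv.2 then (kv.1, kv.2.filter (fun x => x != col)) else kv))
        (PySem.Dict.insert order cat col)
termination_by items.length
decreasing_by all_goals simp

def find_exact_order_alt (potential_orders : List (String × List Int)) : List (String × Int) :=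
  (bElim
    (PySem.List.sorted potential_orders
      (fun kv => toLex (((kv.2.length : Int), kv.1))))
    ⟨[]⟩).items

-- ===== PRECONDITION & SPEC =====
-- The Python argument is a dict, whose keys are necessarily pairwise distinct; Pre_
-- requires exactly that of the association list, so it excludes no Python-reachable input.
def Pre_find_exact_order (potential_orders : List (String × List Int)) : Prop :=
  (potential_orders.map Prod.fst).Nodup
instance (potential_orders : List (String × List Int)) : Decidable (Pre_find_exact_order potential_orders) := by unfold Pre_find_exact_order; infer_instance

def pvWitness_find_exact_order : (List (String × List Int)) :=
  [("row", [1, 2]), ("seat", [2]), ("class", [1, 2, 3])]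

def Spec_find_exact_order (potential_orders : List (String × List Int)) (out : List (String × Int)) : Prop := out = find_exact_order_alt potential_orders
instance (potential_orders : List (String × List Int)) (out : List (String × Int)) : Decidable (Spec_find_exact_order potential_orders out) := by unfold Spec_find_exact_order; infer_instance

-- ===== CLAIM (what is proved, stated in full; the proofs are below) =====
def Claim_equal_find_exact_order : Prop := ∀ (potential_orders : List (String × List Int)), Dom_find_exact_order potential_orders → Pre_find_exact_order potential_orders → Spec_find_exact_order potential_orders (find_exact_order potential_orders)

-- ===== LEMMAS AND PROOFS =====

-- A's inner scan-with-break returns the head of the unseen-filtered candidate list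
theorem inner_eq (cols : List Int) (category : String)
    (order : PySem.Dict String Int) (seen : PySem.Set Int) :
    pqInnerA cols category order seen =
      match (cols.filter (fun x => !PySem.Set.contains seen x)).head? with
      | none => (order, seen)
      | some col => (PySem.Dict.insert order category col, PySem.Set.add seen col) := by
  induction cols with
  | nil => rfl
  | cons c rest ih =>
    simp only [pqInnerA, List.filter, PySem.Set.contains]
    by_cases hc : c ∈ seen
    · simp [hc, ih, PySem.Set.contains]
    · simp [hc]

-- popping the minimum repeatedly visits the pool in sorted order
theorem sorted_min_cons (pq : List (Int × String)) (m : Int × String)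
    (h : PySem.List.min? pq (fun p => toLex p) = some m) :
    PySem.List.sorted pq (fun p => toLex p) =
      m :: PySem.List.sorted (pq.erase m) (fun p => toLex p) := by
  have hm : m ∈ pq := PySem.List.min?_mem h
  apply PySem.List.eq_of_perm_of_pairwise_le_of_injective (fun p : Int × String => toLex p)
    (toLex.injective)
  · exact (PySem.List.sorted_perm pq _ false).trans
      ((List.perm_cons_erase hm).trans
        ((PySem.List.sorted_perm (pq.erase m) _ false).symm.cons m))
  · exact PySem.List.sorted_pairwise pq _
  · refine List.Pairwise.cons ?_ (PySem.List.sorted_pairwise (pq.erase m) _)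
    intro y hy
    have hy' : y ∈ pq := List.mem_of_mem_erase (((PySem.List.sorted_perm (pq.erase m) _ false).mem_iff).mp hy)
    exact PySem.List.min?_isMin h y hy'

-- the drain loop is the fold over the sorted pool
theorem drain_eq (po : List (String × List Int)) :
    ∀ (n : Nat) (pq : List (Int × String)), pq.length ≤ n →
      ∀ (order : PySem.Dict String Int) (seen : PySem.Set Int),
      pqDrainA po pq order seen =
        (List.foldl
          (fun (acc : PySem.Dict String Int × PySem.Set Int) m =>
            pqInnerA (PySem.Dict.getD ⟨po⟩ m.2 []) m.2 acc.1 acc.2)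
          (order, seen)
          (PySem.List.sorted pq (fun p => toLex p))).1 := by
  intro n
  induction n with
  | zero =>
    intro pq hl order seen
    have : pq = [] := List.eq_nil_of_length_eq_zero (Nat.le_zero.mp hl)
    subst this
    unfold pqDrainA
    rfl
  | succ n ih =>
    intro pq hl order seen
    unfold pqDrainA
    split
    · rename_i h
      have : pq = [] := (PySem.List.min?_eq_none_iff pq _).mp h
      subst this
      rfl
    · rename_i m h
      rw [sorted_min_cons pq m h, List.foldl_cons]
      have hm : m ∈ pq := PySem.List.min?_mem h
      have h1 := List.length_erase_of_mem hm
      have h2 := List.length_pos_of_mem hm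
      exact ih (pq.erase m) (by omega) _ _

-- with distinct keys, dict lookup at a member key returns that pair's value
theorem getD_of_mem (po : List (String × List Int)) (hnd : (po.map Prod.fst).Nodup)
    (k : String) (v : List Int) (h : (k, v) ∈ po) :
    PySem.Dict.getD ⟨po⟩ k [] = v := by
  induction po with
  | nil => simp at h
  | cons hd tl ih =>
    obtain ⟨k', v'⟩ := hd
    simp only [List.map_cons, List.nodup_cons] at hnd
    rcases List.mem_cons.mp h with h1 | h1
    · obtain ⟨rfl, rfl⟩ := Prod.mk.injEq .. ▸ h1.symm
      simp [PySem.Dict.getD, PySem.Dict.get?_mk_cons]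
    · have hne : (k' == k) = false := by
        refine beq_eq_false_iff_ne.mpr fun he => hnd.1 ?_
        exact he ▸ List.mem_map_of_mem (f := Prod.fst) h1
      have hrec := ih hnd.2 h1
      simp only [PySem.Dict.getD] at hrec ⊢
      rw [PySem.Dict.get?_mk_cons]
      simp only [hne]
      exact hrec

-- with distinct keys, sorting the mapped pool is mapping the sorted items
theorem sorted_pool_eq (po : List (String × List Int)) (hnd : (po.map Prod.fst).Nodup) :
    PySem.List.sorted (po.map (fun kv => (((kv.2.length : Int), kv.1))))
        (fun p => toLex p) =
      (PySem.List.sorted po (fun kv => toLex (((kv.2.length : Int), kv.1)))).map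
        (fun kv => (((kv.2.length : Int), kv.1))) := by
  apply PySem.List.sorted_eq_of_perm_of_pairwise_lt
  · exact ((PySem.List.sorted_perm po _ false).map _)
  · rw [List.pairwise_map]
    have hle := PySem.List.sorted_pairwise po (fun kv => toLex (((kv.2.length : Int), kv.1)))
    have hnd' : ((PySem.List.sorted po (fun kv => toLex (((kv.2.length : Int), kv.1)))).map Prod.fst).Nodup :=
      ((PySem.List.sorted_perm po _ false).map Prod.fst).nodup_iff.mpr hnd
    have hne : (PySem.List.sorted po (fun kv => toLex (((kv.2.length : Int), kv.1)))).Pairwise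
        (fun a b => a.1 ≠ b.1) := by
      simpa [List.Nodup, List.pairwise_map] using hnd'
    refine (hle.and hne).imp ?_
    rintro a b ⟨h1, h2⟩
    rcases lt_or_eq_of_le h1 with h | h
    · exact h
    · exact absurd (congrArg (fun p => (ofLex p).2) h) h2

-- A's fold step at a member pair uses that pair's own candidate list
theorem foldA_step (po : List (String × List Int)) (hnd : (po.map Prod.fst).Nodup) :
    List.foldl
        (fun (acc : PySem.Dict String Int × PySem.Set Int) m =>
          pqInnerA (PySem.Dict.getD ⟨po⟩ m.2 []) m.2 acc.1 acc.2)
        (⟨[]⟩, PySem.Set.empty)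
        ((PySem.List.sorted po (fun kv => toLex (((kv.2.length : Int), kv.1)))).map
          (fun kv => (((kv.2.length : Int), kv.1)))) =
      List.foldl
        (fun (acc : PySem.Dict String Int × PySem.Set Int) kv =>
          pqInnerA kv.2 kv.1 acc.1 acc.2)
        (⟨[]⟩, PySem.Set.empty)
        (PySem.List.sorted po (fun kv => toLex (((kv.2.length : Int), kv.1)))) := by
  rw [List.foldl_map]
  apply PySem.List.foldl_congr_mem
  intro acc kv hkv
  have hkv0 : kv ∈ po := by
    simpa [PySem.List.mem_sorted] using hkv
  rw [getD_of_mem po hnd kv.1 kv.2 hkv0]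

-- the membership guard is cosmetic: on a list without col the filter is the identity
theorem guardFun_eq (col : Int) :
    (fun kv : String × List Int =>
        if col ∈ kv.2 then (kv.1, kv.2.filter (fun x => x != col)) else kv) =
      (fun kv : String × List Int => (kv.1, kv.2.filter (fun x => x != col))) := by
  funext kv
  by_cases h : col ∈ kv.2
  · simp [h]
  · have : kv.2.filter (fun x => x != col) = kv.2 :=
      List.filter_eq_self.mpr fun x hx => by
        simp only [bne_iff_ne, ne_eq]
        exact fun he => h (he ▸ hx)
    simp [h, this]

-- the elimination loop simulates the seen-set fold: B's remaining lists are
-- exactly the original lists with the already-seen columns filtered out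
theorem elim_eq : ∀ (n : Nat) (L : List (String × List Int)), L.length ≤ n →
    ∀ (order : PySem.Dict String Int) (seen : PySem.Set Int),
    bElim (L.map (fun kv => (kv.1, kv.2.filter (fun x => !PySem.Set.contains seen x)))) order =
      (L.foldl
        (fun (acc : PySem.Dict String Int × PySem.Set Int) kv =>
          pqInnerA kv.2 kv.1 acc.1 acc.2)
        (order, seen)).1 := by
  intro n
  induction n with
  | zero =>
    intro L hl order seen
    have : L = [] := List.eq_nil_of_length_eq_zero (Nat.le_zero.mp hl)
    subst this
    simp [bElim]
  | succ n ih =>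
    intro L hl order seen
    match L with
    | [] => simp [bElim]
    | (cat, cands) :: rest =>
      rw [List.map_cons, List.foldl_cons, inner_eq cands cat order seen]
      match hh : (cands.filter (fun x => !PySem.Set.contains seen x)).head? with
      | none =>
        have hnil : cands.filter (fun x => !PySem.Set.contains seen x) = [] :=
          List.head?_eq_none_iff.mp hh
        rw [hnil]
        rw [show bElim ((cat, ([] : List Int)) :: rest.map
              (fun kv => (kv.1, kv.2.filter (fun x => !PySem.Set.contains seen x)))) order =
            bElim (rest.map
              (fun kv => (kv.1, kv.2.filter (fun x => !PySem.Set.contains seen x)))) order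
          from by rw [bElim]]
        simp only [List.length_cons] at hl
        exact ih rest (by omega) order seen
      | some col =>
        obtain ⟨tl, htl⟩ : ∃ tl, cands.filter (fun x => !PySem.Set.contains seen x) = col :: tl := by
          cases he : cands.filter (fun x => !PySem.Set.contains seen x) with
          | nil => rw [he] at hh; simp at hh
          | cons a b => rw [he] at hh; simp at hh; exact ⟨b, by rw [hh]⟩
        rw [htl]
        rw [show bElim ((cat, col :: tl) :: rest.map
              (fun kv => (kv.1, kv.2.filter (fun x => !PySem.Set.contains seen x)))) order =
            bElim ((rest.map
                (fun kv => (kv.1, kv.2.filter (fun x => !PySem.Set.contains seen x)))).map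
                (fun kv => (kv.1, kv.2.filter (fun x => x != col))))
              (PySem.Dict.insert order cat col)
          from by rw [bElim, guardFun_eq]]
        rw [List.map_map]
        have hcomp :
            ((fun kv : String × List Int => (kv.1, kv.2.filter (fun x => x != col))) ∘
              (fun kv : String × List Int => (kv.1, kv.2.filter (fun x => !PySem.Set.contains seen x)))) =
            (fun kv : String × List Int =>
              (kv.1, kv.2.filter (fun x => !PySem.Set.contains (PySem.Set.add seen col) x))) := by
          funext kv
          simp only [Function.comp]
          congr 1
          rw [List.filter_filter]
          apply List.filter_congr
          intro x _
          have hma := PySem.Set.mem_add seen col x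
          by_cases h1 : x = col <;> by_cases h2 : x ∈ seen <;>
            simp [PySem.Set.contains, hma, h1, h2]
        rw [hcomp]
        simp only [List.length_cons] at hl
        exact ih rest (by omega) (PySem.Dict.insert order cat col) (PySem.Set.add seen col)

-- with an empty seen set the filter is the identity
theorem map_filter_empty (L : List (String × List Int)) :
    L.map (fun kv => (kv.1, kv.2.filter (fun x => !PySem.Set.contains PySem.Set.empty x))) = L := by
  have : ∀ kv : String × List Int,
      (kv.1, kv.2.filter (fun x => !PySem.Set.contains PySem.Set.empty x)) = kv := by
    intro kv
    have : kv.2.filter (fun x => !PySem.Set.contains PySem.Set.empty x) = kv.2 := by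
      apply List.filter_eq_self.mpr
      intro x _
      simp [PySem.Set.contains, PySem.Set.empty]
    rw [this]
  simp only [this, List.map_id']

-- ===== VERDICT (by name: the statement is the Claim_ definition above) =====
theorem find_exact_order_spec : Claim_equal_find_exact_order := by
  intro po _ hnd
  unfold Spec_find_exact_order find_exact_order find_exact_order_alt
  have hpool : po.map (fun kv => (((PySem.Dict.getD ⟨po⟩ kv.1 []).length : Int), kv.1)) =
      po.map (fun kv => (((kv.2.length : Int), kv.1))) := by
    apply List.map_congr_left
    intro kv hkv
    rw [getD_of_mem po hnd kv.1 kv.2 (by simpa using hkv)]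
  rw [drain_eq po (po.map _).length _ (le_refl _), hpool, sorted_pool_eq po hnd,
      foldA_step po hnd,
      ← elim_eq (PySem.List.sorted po _).length _ (le_refl _) ⟨[]⟩ PySem.Set.empty,
      map_filter_empty]
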